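-- pv_equiv track=rewrite | github.com/GaokaiZhang/CS-Drafting | main_fixed_window.py | select_eval_items
-- ===== SOURCE A (Python) =====
-- def select_eval_items(test_set, cfg):
--     if cfg["num_shards"] < 1:
--         raise ValueError("num_shards must be >= 1")
--     if cfg["shard_index"] < 0 or cfg["shard_index"] >= cfg["num_shards"]:
--         raise ValueError("shard_index must satisfy 0 <= shard_index < num_shards")
--
--     n_samples = cfg.get("n_samples")
--     if n_samples is None or int(n_samples) <= 0:
--         requested = test_set
--     else:
--         requested = test_set[: int(n_samples)]
--     if cfg["num_shards"] == 1:
--         return list(enumerate(requested))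
--     return [
--         (sample_index, item)
--         for sample_index, item in enumerate(requested)
--         if sample_index % cfg["num_shards"] == cfg["shard_index"]
--     ]
-- ===== SOURCE B (Python) =====
-- def select_eval_items(test_set, cfg):
--     if cfg["num_shards"] < 1:
--         raise ValueError("num_shards must be >= 1")
--     if cfg["shard_index"] < 0 or cfg["shard_index"] >= cfg["num_shards"]:
--         raise ValueError("shard_index must satisfy 0 <= shard_index < num_shards")
--
--     n_samples = cfg.get("n_samples")
--     limit = len(test_set)
--     if n_samples is not None and 0 < int(n_samples) < limit:
--         limit = int(n_samples)
--     out = []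
--     i = cfg["shard_index"]
--     step = cfg["num_shards"]
--     while i < limit:
--         out.append((i, test_set[i]))
--         i += step
--     return out
-- ===== Notes on version B (the rewrite author's own statement) =====
-- stated objective: alternative
-- what changed: Replaces A's materialised prefix slice plus enumerate-all-and-filter-by-modulo comprehension (with a num_shards==1 special case) by a single explicit while loop over an accumulator that strides i from shard_index by num_shards up to a computed limit, never slicing or scanning unselected indices.
import Mathlib
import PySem

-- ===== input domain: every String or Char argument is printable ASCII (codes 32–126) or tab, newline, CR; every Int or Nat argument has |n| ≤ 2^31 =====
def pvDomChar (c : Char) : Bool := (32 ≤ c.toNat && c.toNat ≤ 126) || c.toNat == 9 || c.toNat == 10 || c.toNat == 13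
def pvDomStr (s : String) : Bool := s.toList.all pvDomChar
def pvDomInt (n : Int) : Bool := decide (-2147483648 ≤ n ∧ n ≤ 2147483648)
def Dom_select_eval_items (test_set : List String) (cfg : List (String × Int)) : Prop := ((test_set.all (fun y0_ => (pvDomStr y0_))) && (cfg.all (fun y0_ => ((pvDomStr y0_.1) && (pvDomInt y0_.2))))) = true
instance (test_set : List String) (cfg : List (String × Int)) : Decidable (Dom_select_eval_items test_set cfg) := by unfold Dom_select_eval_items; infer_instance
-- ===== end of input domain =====

-- B replaces A's slice + enumerate-and-filter-by-modulo (plus a num_shards == 1 special case)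
-- with one explicit while loop that strides over only the selected indices (objective: alternative).

-- ===== PORT A =====
def select_eval_items (test_set : List String) (cfg : List (String × Int)) : List (Int × String) :=
  -- cfg["num_shards"] / cfg["shard_index"]: KeyError when absent is excluded by Pre_
  -- (the .getD 0 default is then never the value used on an admitted input).
  let ns : Int := (cfg.lookup "num_shards").getD 0
  let si : Int := (cfg.lookup "shard_index").getD 0
  if ns < 1 then []                      -- raise ValueError (excluded by Pre_)
  else if si < 0 ∨ si ≥ ns then []       -- raise ValueError (excluded by Pre_)
  else
    -- n_samples = cfg.get("n_samples"); None or <= 0 keeps the whole test_set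
    let nsamp : Int := (cfg.lookup "n_samples").getD 0
    let requested : List String :=
      if nsamp ≤ 0 then test_set else PySem.List.slice test_set none (some nsamp)
    if ns = 1 then PySem.List.enumerate requested
    else (PySem.List.enumerate requested).filter (fun p => PySem.Int.mod p.1 ns == si)

-- ===== PORT B =====
-- the 'while i < limit' loop of Source B; step = s1 + 1 encodes the loop increment
-- cfg["num_shards"], which the guard has established to be ≥ 1, so the loop terminates.
def pvWalk (xs : List String) (s1 : Nat) (i limit : Nat) : List (Int × String) :=
  if i < limit then
    ((i : Int), PySem.List.pyGetD xs (i : Int) "") :: pvWalk xs s1 (i + s1 + 1) limit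
  else []
termination_by limit - i
decreasing_by omega

def select_eval_items_alt (test_set : List String) (cfg : List (String × Int)) : List (Int × String) :=
  let shards : Int := (cfg.lookup "num_shards").getD 0
  let shard : Int := (cfg.lookup "shard_index").getD 0
  if shards < 1 then []                  -- raise ValueError (excluded by Pre_)
  else if shard < 0 ∨ shard ≥ shards then []  -- raise ValueError (excluded by Pre_)
  else
    let cap : Int := (cfg.lookup "n_samples").getD 0
    let limit : Int :=
      if 0 < cap ∧ cap < PySem.List.len test_set then cap else PySem.List.len test_set
    pvWalk test_set (shards - 1).toNat shard.toNat limit.toNat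

-- ===== PRECONDITION & SPEC =====
-- Pre_ excludes exactly the inputs on which Python A raises: a missing "num_shards" or
-- "shard_index" key (KeyError) or a shard configuration failing the two explicit ValueError guards.
def Pre_select_eval_items (test_set : List String) (cfg : List (String × Int)) : Prop :=
  (cfg.lookup "num_shards").isSome ∧ (cfg.lookup "shard_index").isSome ∧
  1 ≤ ((cfg.lookup "num_shards").getD 0) ∧ 0 ≤ ((cfg.lookup "shard_index").getD 0) ∧
  ((cfg.lookup "shard_index").getD 0) < ((cfg.lookup "num_shards").getD 0)

instance (test_set : List String) (cfg : List (String × Int)) : Decidable (Pre_select_eval_items test_set cfg) := by unfold Pre_select_eval_items; infer_instance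

def pvWitness_select_eval_items : List String × (List (String × Int)) :=
  (["a", "b", "c"], [("num_shards", 2), ("shard_index", 1), ("n_samples", 2)])

def Spec_select_eval_items (test_set : List String) (cfg : List (String × Int)) (out : List (Int × String)) : Prop := out = select_eval_items_alt test_set cfg
instance (test_set : List String) (cfg : List (String × Int)) (out : List (Int × String)) : Decidable (Spec_select_eval_items test_set cfg out) := by unfold Spec_select_eval_items; infer_instance

-- ===== CLAIM (what is proved, stated in full; the proofs are below) =====
def Claim_equal_select_eval_items : Prop := ∀ (test_set : List String) (cfg : List (String × Int)), Dom_select_eval_items test_set cfg → Pre_select_eval_items test_set cfg → Spec_select_eval_items test_set cfg (select_eval_items test_set cfg)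

-- ===== LEMMAS AND PROOFS =====

-- A strided range with positive step is strictly increasing.
theorem pv_pairwise_lt_pyRange_pos (a b s : Int) (hs : 0 < s) :
    (PySem.List.pyRange a b s).Pairwise (· < ·) := by
  rw [PySem.List.pyRange_of_pos a b hs]
  refine List.Pairwise.map _ ?_ (List.pairwise_lt_range)
  intro x y hxy
  have : (x : Int) < (y : Int) := by exact_mod_cast hxy
  nlinarith

-- Core: filtering range(0, n) by i % ns == si IS range(si, n, ns), for 0 ≤ si < ns.
theorem pv_filter_mod_eq_stride (n : Nat) (ns si : Int) (h1 : 1 ≤ ns) (h2 : 0 ≤ si)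
    (h3 : si < ns) :
    (PySem.List.pyRange 0 (n : Int) 1).filter (fun i => PySem.Int.mod i ns == si)
      = PySem.List.pyRange si (n : Int) ns := by
  have hns : (0 : Int) < ns := by omega
  have hnodup1 : ((PySem.List.pyRange 0 (n : Int) 1).filter
      (fun i => PySem.Int.mod i ns == si)).Pairwise (· < ·) :=
    (PySem.List.pairwise_lt_pyRange_one 0 (n : Int)).sublist List.filter_sublist
  have hnodup2 := pv_pairwise_lt_pyRange_pos si (n : Int) ns hns
  refine List.Perm.eq_of_pairwise (fun a b _ _ hab hba => absurd hba (lt_asymm hab))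
    hnodup1 hnodup2 ((List.perm_ext_iff_of_nodup hnodup1.nodup hnodup2.nodup).2 ?_)
  intro x
  rw [List.mem_filter, PySem.List.mem_pyRange_one, PySem.List.mem_pyRange_iff_of_pos hns]
  constructor
  · rintro ⟨⟨hx0, hxn⟩, hmod⟩
    rw [beq_iff_eq, PySem.Int.mod_eq_emod_of_pos hns] at hmod
    have hdiv : 0 ≤ x / ns := Int.ediv_nonneg hx0 (by omega)
    have hmul : 0 ≤ ns * (x / ns) := mul_nonneg (by omega) hdiv
    have hdef : ns * (x / ns) + x % ns = x := Int.mul_ediv_add_emod x ns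
    exact ⟨by omega, hxn, x / ns, by omega⟩
  · rintro ⟨hsix, hxn, k, hk⟩
    have hx0 : 0 ≤ x := by omega
    refine ⟨⟨hx0, hxn⟩, ?_⟩
    rw [beq_iff_eq, PySem.Int.mod_eq_emod_of_pos hns]
    have : x = ns * k + si := by omega
    subst this
    simp [Int.emod_eq_of_lt h2 h3]

-- enumerate-then-filter equals the strided range map, for 0 ≤ si < ns.
theorem pv_enum_filter_eq_stride (l : List String) (ns si : Int) (h1 : 1 ≤ ns)
    (h2 : 0 ≤ si) (h3 : si < ns) :
    (PySem.List.enumerate l).filter (fun p => PySem.Int.mod p.1 ns == si)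
      = (PySem.List.pyRange si (PySem.List.len l) ns).map
          (fun i => (i, PySem.List.pyGetD l i "")) := by
  rw [PySem.List.enumerate_eq_map_pyRange l "", List.filter_map, PySem.List.len]
  rw [show ((fun p : Int × String => PySem.Int.mod p.1 ns == si) ∘
        (fun j => (j, PySem.List.pyGetD l j ""))) = fun i => PySem.Int.mod i ns == si from rfl]
  rw [pv_filter_mod_eq_stride l.length ns si h1 h2 h3]

-- empty and cons forms of a positive-step range.
theorem pv_pyRange_pos_nil (a b s : Int) (hs : 0 < s) (h : b ≤ a) :
    PySem.List.pyRange a b s = [] := by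
  rw [PySem.List.pyRange_of_pos a b hs, if_neg (by omega)]
  simp

theorem pv_pyRange_pos_cons (a b s : Int) (hs : 0 < s) (h : a < b) :
    PySem.List.pyRange a b s = a :: PySem.List.pyRange (a + s) b s := by
  rw [PySem.List.pyRange_of_pos a b hs, PySem.List.pyRange_of_pos (a + s) b hs, if_pos h]
  have hdiv : (b - a + s - 1) / s = (b - a - 1) / s + 1 := by
    have := Int.add_mul_ediv_right (b - a - 1) 1 (by omega : s ≠ 0)
    have he : b - a + s - 1 = b - a - 1 + 1 * s := by ring
    rw [he, this]
  by_cases h2 : a + s < b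
  · rw [if_pos h2]
    have hn : ((b - a + s - 1) / s).toNat = ((b - (a + s) + s - 1) / s).toNat + 1 := by
      have h0 : 0 ≤ (b - a - 1) / s := Int.ediv_nonneg (by omega) (by omega)
      have : b - (a + s) + s - 1 = b - a - 1 := by ring
      rw [this, hdiv]; omega
    rw [hn, List.range_succ_eq_map]
    simp only [List.map_cons, List.map_map, Nat.cast_zero, mul_zero, add_zero]
    congr 1
    apply List.map_congr_left
    intro k _
    simp only [Function.comp_apply, Nat.succ_eq_add_one]
    push_cast; ring
  · rw [if_neg h2]
    have hsmall : (b - a - 1) / s = 0 := by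
      apply Int.ediv_eq_zero_of_lt (by omega) (by omega)
    have : ((b - a + s - 1) / s).toNat = 1 := by rw [hdiv, hsmall]; rfl
    rw [this]
    simp

-- the while loop of B IS the strided range map over the same list.
theorem pv_walk_eq (xs : List String) (s1 : Nat) (i limit : Nat) :
    pvWalk xs s1 i limit
      = (PySem.List.pyRange (i : Int) (limit : Int) ((s1 : Int) + 1)).map
          (fun j => (j, PySem.List.pyGetD xs j "")) := by
  rw [pvWalk]
  split
  · next h =>
    rw [pv_pyRange_pos_cons _ _ _ (by omega) (by exact_mod_cast h)]
    rw [List.map_cons, pv_walk_eq xs s1 (i + s1 + 1) limit]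
    push_cast
    ring_nf
  · next h =>
    rw [pv_pyRange_pos_nil _ _ _ (by omega) (by exact_mod_cast Nat.le_of_not_lt h)]
    rfl

-- elements of the strided range are in-range indices of the prefix.
theorem pv_getD_prefix (xs : List String) (n : Nat) (j : Int) (h0 : 0 ≤ j)
    (hj : j < (n : Int)) :
    PySem.List.pyGetD (xs.take n) j "" = PySem.List.pyGetD xs j "" := by
  rw [PySem.List.pyGetD_of_nonneg _ _ h0, PySem.List.pyGetD_of_nonneg _ _ h0]
  unfold List.getD
  rw [List.getElem?_take_of_lt (by omega)]

-- ===== VERDICT (by name: the statement is the Claim_ definition above) =====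
theorem select_eval_items_spec : Claim_equal_select_eval_items := by
  intro test_set cfg _ hpre
  obtain ⟨-, -, hg1, hg2, hg3⟩ := hpre
  unfold Spec_select_eval_items select_eval_items select_eval_items_alt
  set ns : Int := (cfg.lookup "num_shards").getD 0 with hns
  set si : Int := (cfg.lookup "shard_index").getD 0 with hsi
  set cap : Int := (cfg.lookup "n_samples").getD 0 with hcap
  simp only [if_neg (show ¬ ns < 1 by omega), if_neg (show ¬ (si < 0 ∨ si ≥ ns) by omega)]
  have hlim : ∀ limN : Nat,
      (if 0 < cap ∧ cap < PySem.List.len test_set then cap else PySem.List.len test_set)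
        = (limN : Int) →
      (if cap ≤ 0 then test_set else PySem.List.slice test_set none (some cap)).length = limN ∧
      (∀ j : Int, 0 ≤ j → j < (limN : Int) →
        PySem.List.pyGetD (if cap ≤ 0 then test_set else PySem.List.slice test_set none (some cap)) j ""
          = PySem.List.pyGetD test_set j "") := by
    intro limN hEq
    by_cases hc : cap ≤ 0
    · rw [if_neg (show ¬ (0 < cap ∧ cap < PySem.List.len test_set) by omega)] at hEq
      rw [if_pos hc]
      rw [PySem.List.len] at hEq
      exact ⟨by exact_mod_cast hEq, fun _ _ _ => rfl⟩
    · rw [if_neg hc, PySem.List.slice_to test_set (by omega)]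
      rw [PySem.List.len] at hEq
      constructor
      · rw [List.length_take]
        by_cases h2 : cap < (test_set.length : Int)
        · rw [if_pos ⟨by omega, h2⟩] at hEq; omega
        · rw [if_neg (by omega)] at hEq; omega
      · intro j h0 hj
        apply pv_getD_prefix
        · exact h0
        · by_cases h2 : cap < (test_set.length : Int)
          · rw [if_pos ⟨by omega, h2⟩] at hEq; omega
          · rw [if_neg (by omega)] at hEq; omega
  set limI : Int :=
    (if 0 < cap ∧ cap < PySem.List.len test_set then cap else PySem.List.len test_set) with hlimI
  have hlimPos : 0 ≤ limI := by
    rw [hlimI]; split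
    · omega
    · rw [PySem.List.len]; positivity
  obtain ⟨hlen, hget⟩ := hlim limI.toNat (by omega)
  have hA : (if ns = 1 then
        PySem.List.enumerate (if cap ≤ 0 then test_set else PySem.List.slice test_set none (some cap))
      else (PySem.List.enumerate (if cap ≤ 0 then test_set else PySem.List.slice test_set none (some cap))).filter
        (fun p => PySem.Int.mod p.1 ns == si))
      = (PySem.List.pyRange si limI ns).map
          (fun j => (j, PySem.List.pyGetD (if cap ≤ 0 then test_set else PySem.List.slice test_set none (some cap)) j "")) := by
    have hlen' : PySem.List.len
        (if cap ≤ 0 then test_set else PySem.List.slice test_set none (some cap)) = limI := by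
      rw [PySem.List.len, hlen]; omega
    by_cases h1 : ns = 1
    · rw [if_pos h1, PySem.List.enumerate_eq_map_pyRange _ "", hlen', h1]
      rw [show si = 0 by omega]
    · rw [if_neg h1, pv_enum_filter_eq_stride _ ns si hg1 hg2 hg3, hlen']
  rw [hA, pv_walk_eq]
  have c1 : ((si.toNat : Nat) : Int) = si := by omega
  have c2 : ((limI.toNat : Nat) : Int) = limI := by omega
  have c3 : (((ns - 1).toNat : Nat) : Int) + 1 = ns := by omega
  rw [c1, c2, c3]
  apply List.map_congr_left
  intro j hj
  rw [PySem.List.mem_pyRange_iff_of_pos (by omega)] at hj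
  rw [hget j (by omega) (by omega)]
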